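-- pv_equiv track=rewrite | github.com/tnem/ZSNES-serv | zsnesClient.py | splitBufferIntoPackets
-- ===== SOURCE A (Python) =====
-- def splitBufferIntoPackets(buffer):
--     firstPacket = []
--     restBuffer = buffer
--
--     if buffer[0] in [0x00, 0x08]:
--         firstPacket = buffer[:2]
--         restBuffer = buffer[2:]
--     elif buffer[0] in [0xfe, 0xfd, 0x01]:
--         firstPacket = buffer[:1]
--         restBuffer = buffer[1:]
--     elif buffer[0] == 2:
--         firstPacket = buffer[:2]
--         restBuffer = buffer[2:]
--
--     while len(restBuffer) > 0 and restBuffer[0] == 128: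
--         firstPacket += restBuffer[:3]
--         restBuffer = restBuffer[3:]
--
--     return firstPacket,restBuffer
-- ===== SOURCE B (Python) =====
-- def splitBufferIntoPackets(buffer):
--     b0 = buffer[0]
--     if b0 in (0x00, 0x08, 0x02):
--         i = 2
--     elif b0 in (0xfe, 0xfd, 0x01):
--         i = 1
--     else:
--         i = 0
--     n = len(buffer)
--     while i < n and buffer[i] == 128:
--         i += 3
--     return buffer[:i], buffer[i:]
-- ===== Notes on version B (the rewrite author's own statement) =====
-- stated objective: alternative
-- what changed: B replaces A's loop that repeatedly concatenates 3-element slices onto firstPacket and re-slices the remainder by a single index scan advancing by 3 and one final split of the buffer; on garbage-free buffers (few 128 runs) the cost is comparable, so no speed is claimed.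
-- outside the precondition, e.g. on splitBufferIntoPackets([]): A raises IndexError, B raises IndexError
import Mathlib
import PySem

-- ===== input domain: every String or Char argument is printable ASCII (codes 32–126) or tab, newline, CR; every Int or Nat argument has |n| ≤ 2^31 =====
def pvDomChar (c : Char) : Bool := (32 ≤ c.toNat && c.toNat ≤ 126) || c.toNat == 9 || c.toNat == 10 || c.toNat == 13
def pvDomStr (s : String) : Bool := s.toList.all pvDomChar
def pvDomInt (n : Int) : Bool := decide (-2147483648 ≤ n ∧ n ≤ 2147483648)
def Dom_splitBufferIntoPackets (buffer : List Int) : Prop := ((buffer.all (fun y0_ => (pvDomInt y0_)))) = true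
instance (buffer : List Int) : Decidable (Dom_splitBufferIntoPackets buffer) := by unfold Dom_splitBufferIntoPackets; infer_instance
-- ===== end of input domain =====

-- B replaces A's slice-accumulating loop by a single index scan advancing by 3
-- with one final split (objective: alternative).

-- ===== PORT A =====
-- A's while loop: repeatedly move restBuffer[:3] onto firstPacket while it starts with 128.
def pvALoop (fp rb : List Int) : List Int × List Int :=
  match rb with
  | x :: rest =>
      if x = 128 then pvALoop (fp ++ (x :: rest).take 3) ((x :: rest).drop 3)
      else (fp, x :: rest)
  | [] => (fp, [])
termination_by rb.length
decreasing_by simp [List.length_drop]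

def splitBufferIntoPackets (buffer : List Int) : List Int × List Int :=
  -- buffer[0]: Python raises IndexError on []; Pre_ excludes that input
  let h0 := (PySem.List.pyGet? buffer 0).getD 0
  let p :=
    if h0 = 0x00 ∨ h0 = 0x08 then (buffer.take 2, buffer.drop 2)
    else if h0 = 0xfe ∨ h0 = 0xfd ∨ h0 = 0x01 then (buffer.take 1, buffer.drop 1)
    else if h0 = 2 then (buffer.take 2, buffer.drop 2)
    else ([], buffer)
  pvALoop p.1 p.2

-- ===== PORT B =====
-- B's while loop: advance index i by 3 while buffer[i] == 128.
def pvBLoop (buffer : List Int) (i : Nat) : Nat :=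
  if h : buffer[i]? = some 128 then pvBLoop buffer (i + 3) else i
termination_by buffer.length - i
decreasing_by
  have : i < buffer.length := by
    by_contra hlt
    simp [List.getElem?_eq_none (by omega : buffer.length ≤ i)] at h
  omega

def splitBufferIntoPackets_alt (buffer : List Int) : List Int × List Int :=
  let b0 := (PySem.List.pyGet? buffer 0).getD 0   -- buffer[0]; Pre_ excludes []
  let i :=
    if b0 = 0x00 ∨ b0 = 0x08 ∨ b0 = 0x02 then 2
    else if b0 = 0xfe ∨ b0 = 0xfd ∨ b0 = 0x01 then 1
    else 0
  let j := pvBLoop buffer i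
  (buffer.take j, buffer.drop j)

-- ===== PRECONDITION & SPEC =====
-- Pre_ excludes only the empty list, on which Python A (buffer[0]) raises IndexError.
def Pre_splitBufferIntoPackets (buffer : List Int) : Prop := buffer ≠ []
instance (buffer : List Int) : Decidable (Pre_splitBufferIntoPackets buffer) := by
  unfold Pre_splitBufferIntoPackets; infer_instance
def pvWitness_splitBufferIntoPackets : List Int := [8, 5, 128, 1, 2, 7]

def Spec_splitBufferIntoPackets (buffer : List Int) (out : List Int × List Int) : Prop := out = splitBufferIntoPackets_alt buffer
instance (buffer : List Int) (out : List Int × List Int) : Decidable (Spec_splitBufferIntoPackets buffer out) := by unfold Spec_splitBufferIntoPackets; infer_instance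

-- ===== CLAIM (what is proved, stated in full; the proofs are below) =====
def Claim_equal_splitBufferIntoPackets : Prop := ∀ (buffer : List Int), Dom_splitBufferIntoPackets buffer → Pre_splitBufferIntoPackets buffer → Spec_splitBufferIntoPackets buffer (splitBufferIntoPackets buffer)

-- ===== LEMMAS AND PROOFS =====

-- A's loop started at split point i equals B's scan result.
theorem pvLoop_eq (buffer : List Int) (i : Nat) :
    pvALoop (buffer.take i) (buffer.drop i) =
      (buffer.take (pvBLoop buffer i), buffer.drop (pvBLoop buffer i)) := by
  fun_induction pvBLoop buffer i with
  | case1 i h ih =>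
      obtain ⟨t, hd⟩ : ∃ t, buffer.drop i = 128 :: t := by
        have h0 : (buffer.drop i)[0]? = some 128 := by
          rw [List.getElem?_drop]; simpa using h
        cases hdrop : buffer.drop i with
        | nil => simp [hdrop] at h0
        | cons y t =>
            simp [hdrop] at h0
            exact ⟨t, by simp [h0]⟩
      rw [hd, pvALoop.eq_def]
      have htake : buffer.take i ++ (128 :: t).take 3 = buffer.take (i + 3) := by
        rw [List.take_add, hd]
      have hdrop3 : (128 :: t).drop 3 = buffer.drop (i + 3) := by
        rw [← hd, List.drop_drop]
      dsimp only
      rw [if_pos rfl, htake, hdrop3, ih]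
  | case2 i h =>
      cases hdrop : buffer.drop i with
      | nil => simp [pvALoop]
      | cons y t =>
          have hgi : buffer[i]? = some y := by
            have hx : (buffer.drop i)[0]? = some y := by simp [hdrop]
            rw [List.getElem?_drop] at hx
            simpa using hx
          have hy : y ≠ 128 := by
            intro hy; exact h (by rw [hgi, hy])
          simp [pvALoop, hy]

theorem splitBufferIntoPackets_eq (buffer : List Int) :
    splitBufferIntoPackets buffer = splitBufferIntoPackets_alt buffer := by
  unfold splitBufferIntoPackets splitBufferIntoPackets_alt
  dsimp only
  split_ifs with h1 h2 h3 h4 h5 h6 h7 h8 <;>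
    first
      | exact pvLoop_eq buffer 2
      | exact pvLoop_eq buffer 1
      | simpa using pvLoop_eq buffer 0
      | tauto
      | (exfalso; omega)

-- ===== VERDICT (by name: the statement is the Claim_ definition above) =====
theorem splitBufferIntoPackets_spec : Claim_equal_splitBufferIntoPackets := by
  intro buffer _ _
  exact splitBufferIntoPackets_eq buffer
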